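-- pv_equiv track=rewrite | github.com/bee0511/Cryptography-Engineering | Quiz5/110550164.py | condense
-- ===== SOURCE A (Python) =====
-- def condense(f_min): # make f into GF(2)
--     f = list(set(f_min))
--     for i in f_min:
--         if f_min.count(i) % 2 == 0:
--             if i in f:
--                 f.remove(i)
--     f = sorted(f, reverse=True)
--     return f
-- ===== SOURCE B (Python) =====
-- def condense(f_min): # make f into GF(2)
--     # sort descending once, then a single run-length pass: keep values whose run is odd
--     s = sorted(f_min, reverse=True)
--     res = []
--     i = 0
--     n = len(s)
--     while i < n:
--         j = i
--         while j < n and s[j] == s[i]: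
--             j += 1
--         if (j - i) % 2 == 1:
--             res.append(s[i])
--         i = j
--     return res
-- ===== Notes on version B (the rewrite author's own statement) =====
-- stated objective: faster
-- what changed: Replaces set-dedup plus a repeated f_min.count scan per element and a final sort by one descending sort followed by a single run-length pass that emits values with odd run length, already in order.
import Mathlib
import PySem

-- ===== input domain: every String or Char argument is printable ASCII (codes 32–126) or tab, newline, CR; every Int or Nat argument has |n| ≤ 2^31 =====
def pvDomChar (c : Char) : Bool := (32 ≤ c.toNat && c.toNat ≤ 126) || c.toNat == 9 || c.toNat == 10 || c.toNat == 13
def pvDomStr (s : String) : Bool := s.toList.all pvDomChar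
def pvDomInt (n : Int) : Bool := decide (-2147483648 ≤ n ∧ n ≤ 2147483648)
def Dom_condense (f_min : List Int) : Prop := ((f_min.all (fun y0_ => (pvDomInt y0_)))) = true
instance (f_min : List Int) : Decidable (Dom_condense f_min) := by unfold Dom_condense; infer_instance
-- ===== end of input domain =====

-- B replaces A's set-dedup + repeated .count scans + final sort by one descending
-- sort followed by a single run-length pass (objective: faster, O(n log n) vs O(n^2)).

-- ===== PORT A =====
-- f = list(set(f_min)); for i in f_min: if f_min.count(i) % 2 == 0: if i in f: f.remove(i); return sorted(f, reverse=True)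
def condense (f_min : List Int) : List Int :=
  PySem.List.sorted
    (f_min.foldl (fun f i =>
      if PySem.List.count f_min i % 2 == 0 then
        if f.contains i then
          -- f.remove(i): guarded by `i in f`, so remove? is some here
          (PySem.List.remove? f i).getD f
        else f
      else f) (PySem.Set.ofList f_min))
    (fun x => x) true

-- ===== PORT B =====
-- inner while loop of Source B: length of the run of v at the front of the list, and the rest
def condenseRun (v : Int) : List Int → Nat × List Int
  | [] => (0, [])
  | x :: xs =>
    if x = v then
      let p := condenseRun v xs
      (p.1 + 1, p.2)
    else (0, x :: xs)

theorem condenseRun_len (v : Int) (l : List Int) : (condenseRun v l).2.length ≤ l.length := by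
  induction l with
  | nil => simp [condenseRun]
  | cons x xs ih =>
    simp only [condenseRun]
    split
    · exact le_trans ih (by simp)
    · simp

-- outer while loop of Source B: emit the run's value when its length is odd
def condenseRLE : List Int → List Int
  | [] => []
  | x :: xs =>
    let p := condenseRun x xs
    if (p.1 + 1) % 2 = 1 then x :: condenseRLE p.2 else condenseRLE p.2
termination_by s => s.length
decreasing_by
  all_goals exact Nat.lt_succ_of_le (condenseRun_len x xs)

def condense_alt (f_min : List Int) : List Int :=
  condenseRLE (PySem.List.sorted f_min (fun x => x) true)

-- ===== PRECONDITION & SPEC =====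
def Spec_condense (f_min : List Int) (out : List Int) : Prop := out = condense_alt f_min
instance (f_min : List Int) (out : List Int) : Decidable (Spec_condense f_min out) := by unfold Spec_condense; infer_instance

-- ===== CLAIM (what is proved, stated in full; the proofs are below) =====
def Claim_equal_condense : Prop := ∀ (f_min : List Int), Dom_condense f_min → Spec_condense f_min (condense f_min)

-- ===== LEMMAS AND PROOFS =====

-- A's loop body simplifies to a guarded erase
theorem stepA_eq (f_min f : List Int) (i : Int) :
    (if PySem.List.count f_min i % 2 == 0 then
      if f.contains i then (PySem.List.remove? f i).getD f else f
    else f) = if List.count i f_min % 2 = 0 then f.erase i else f := by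
  rw [PySem.List.count_eq]
  by_cases h : List.count i f_min % 2 = 0
  · simp only [h, beq_self_eq_true, if_true]
    by_cases hm : i ∈ f
    · simp [hm, PySem.List.remove?_eq_some_erase f i hm]
    · simp [hm, List.erase_of_not_mem hm]
  · simp [h]

-- A's whole loop is a filter: it erases exactly the even-count elements occurring in `pending`
theorem loopA_eq (f_min : List Int) (pending : List Int) :
    ∀ f : List Int, f.Nodup →
    pending.foldl (fun f i =>
      if PySem.List.count f_min i % 2 == 0 then
        if f.contains i then (PySem.List.remove? f i).getD f else f
      else f) f
    = f.filter (fun x => !(pending.contains x && (List.count x f_min % 2 == 0))) := by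
  induction pending with
  | nil => intro f hf; simp
  | cons i rest ih =>
    intro f hf
    rw [List.foldl_cons, stepA_eq]
    by_cases h : List.count i f_min % 2 = 0
    · rw [if_pos h, ih _ (hf.erase i), List.Nodup.erase_eq_filter hf i, List.filter_filter]
      apply List.filter_congr
      intro x _
      by_cases hx : x = i
      · subst hx; simp [h]
      · simp [hx]
    · rw [if_neg h, ih _ hf]
      apply List.filter_congr
      intro x _
      by_cases hx : x = i
      · subst hx; simp [h]
      · simp [hx]

-- characterisation of A's result before the final sort
theorem condense_eq_sorted_filter (f_min : List Int) :
    condense f_min = PySem.List.sorted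
      ((PySem.Set.ofList f_min).filter (fun x => !(List.count x f_min % 2 == 0)))
      (fun x => x) true := by
  unfold condense
  rw [loopA_eq f_min f_min _ (PySem.Set.nodup_ofList f_min)]
  congr 1
  apply List.filter_congr
  intro x hx
  have hmem : x ∈ f_min := (PySem.Set.mem_ofList f_min x).mp hx
  have hc : f_min.contains x = true := by simpa using hmem
  rw [hc, Bool.true_and]

-- run-length spec: the list splits as a block of v followed by a rest not starting with v
theorem condenseRun_spec (v : Int) (l : List Int) :
    l = List.replicate (condenseRun v l).1 v ++ (condenseRun v l).2 ∧
    (∀ y, (condenseRun v l).2.head? = some y → y ≠ v) := by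
  induction l with
  | nil => simp [condenseRun]
  | cons x xs ih =>
    by_cases h : x = v
    · subst h
      simp only [condenseRun]
      refine ⟨?_, ih.2⟩
      conv_lhs => rw [ih.1]
      simp [List.replicate_succ]
    · simp [condenseRun, h]

-- two strictly decreasing lists with the same members are equal
theorem eq_of_desc_of_mem (l₁ : List Int) :
    ∀ l₂ : List Int, l₁.Pairwise (fun a b => b < a) → l₂.Pairwise (fun a b => b < a) →
    (∀ x, x ∈ l₁ ↔ x ∈ l₂) → l₁ = l₂ := by
  induction l₁ with
  | nil =>
    intro l₂ _ _ hm
    cases l₂ with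
    | nil => rfl
    | cons b u => exact absurd ((hm b).mpr (by simp)) (by simp)
  | cons a t ih =>
    intro l₂ h₁ h₂ hm
    cases l₂ with
    | nil => exact absurd ((hm a).mp (by simp)) (by simp)
    | cons b u =>
      have hab : a = b := by
        have ha : a ∈ b :: u := (hm a).mp (by simp)
        have hb : b ∈ a :: t := (hm b).mpr (by simp)
        rcases List.mem_cons.mp ha with h | h
        · exact h
        · have h1 : a < b := (List.pairwise_cons.mp h₂).1 a h
          rcases List.mem_cons.mp hb with h' | h'
          · omega
          · have h2 : b < a := (List.pairwise_cons.mp h₁).1 b h'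
            omega
      subst hab
      have ht : t = u := by
        apply ih u (List.pairwise_cons.mp h₁).2 (List.pairwise_cons.mp h₂).2
        intro x
        constructor
        · intro hx
          have hxa : x < a := (List.pairwise_cons.mp h₁).1 x hx
          rcases List.mem_cons.mp ((hm x).mp (List.mem_cons_of_mem a hx)) with h | h
          · omega
          · exact h
        · intro hx
          have hxa : x < a := (List.pairwise_cons.mp h₂).1 x hx
          rcases List.mem_cons.mp ((hm x).mpr (List.mem_cons_of_mem a hx)) with h | h
          · omega
          · exact h
      rw [ht]

-- B's run-length pass on a descending list: strictly decreasing output,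
-- containing exactly the odd-count members
theorem condenseRLE_spec (n : Nat) :
    ∀ s : List Int, s.length ≤ n → s.Pairwise (fun a b => b ≤ a) →
    (condenseRLE s).Pairwise (fun a b => b < a) ∧
    (∀ x, x ∈ condenseRLE s ↔ x ∈ s ∧ s.count x % 2 = 1) := by
  induction n with
  | zero =>
    intro s hs _
    have : s = [] := List.eq_nil_of_length_eq_zero (Nat.le_zero.mp hs)
    subst this
    simp [condenseRLE]
  | succ n ih =>
    intro s hs hp
    cases s with
    | nil => simp [condenseRLE]
    | cons x xs =>
      obtain ⟨hsplit, hhead⟩ := condenseRun_spec x xs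
      rcases hcr : condenseRun x xs with ⟨k, r⟩
      rw [hcr] at hsplit hhead
      simp only at hsplit hhead
      have hxs_le : ∀ y ∈ xs, y ≤ x := (List.pairwise_cons.mp hp).1
      have hr_desc : r.Pairwise (fun a b => b ≤ a) := by
        have hsub : r.Sublist xs := by
          rw [hsplit]; exact (List.sublist_append_right _ _)
        exact List.Pairwise.sublist hsub (List.pairwise_cons.mp hp).2
      have hr_lt : ∀ y ∈ r, y < x := by
        intro y hy
        have hy_le : y ≤ x := hxs_le y (by rw [hsplit]; exact List.mem_append_right _ hy)
        cases r with
        | nil => simp at hy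
        | cons c t =>
          have hc : c ≠ x := hhead c rfl
          rcases List.mem_cons.mp hy with h | h
          · subst h; omega
          · have : y ≤ c := (List.pairwise_cons.mp hr_desc).1 y h
            have hc_le : c ≤ x := hxs_le c (by rw [hsplit]; exact List.mem_append_right _ (by simp))
            omega
      have hxr : x ∉ r := fun h => absurd (hr_lt x h) (by omega)
      have hr_len : r.length ≤ n := by
        have h1 := condenseRun_len x xs
        rw [hcr] at h1
        simp only [List.length_cons] at hs h1
        omega
      obtain ⟨ihp, ihm⟩ := ih r hr_len hr_desc
      have hcx : (x :: xs).count x = k + 1 := by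
        rw [List.count_cons_self]
        conv_lhs => rw [hsplit]
        rw [List.count_append, List.count_replicate_self, List.count_eq_zero_of_not_mem hxr]
      have hcy : ∀ y, y ≠ x → (x :: xs).count y = r.count y := by
        intro y hy
        rw [List.count_cons_of_ne (Ne.symm hy)]
        conv_lhs => rw [hsplit]
        rw [List.count_append, List.count_replicate, if_neg (by simp [Ne.symm hy]), Nat.zero_add]
      have hmem : ∀ y, y ∈ x :: xs ↔ y = x ∨ y ∈ r := by
        intro y
        constructor
        · intro hy
          rcases List.mem_cons.mp hy with h | h
          · exact Or.inl h
          · rw [hsplit] at h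
            rcases List.mem_append.mp h with h | h
            · exact Or.inl (List.eq_of_mem_replicate h)
            · exact Or.inr h
        · rintro (h | h)
          · simp [h]
          · exact List.mem_cons_of_mem _ (by rw [hsplit]; exact List.mem_append_right _ h)
      show (condenseRLE (x :: xs)).Pairwise _ ∧ _
      rw [condenseRLE]
      simp only [hcr]
      by_cases hodd : (k + 1) % 2 = 1
      · rw [if_pos hodd]
        constructor
        · exact List.pairwise_cons.mpr ⟨fun y hy => hr_lt y ((ihm y).mp hy).1, ihp⟩
        · intro y
          rw [List.mem_cons, ihm y]
          constructor
          · rintro (h | ⟨h1, h2⟩)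
            · subst h; exact ⟨by simp, by rw [hcx]; exact hodd⟩
            · have hyx : y ≠ x := fun h => absurd (hr_lt y h1) (by simp [h])
              exact ⟨(hmem y).mpr (Or.inr h1), by rw [hcy y hyx]; exact h2⟩
          · rintro ⟨h1, h2⟩
            by_cases hyx : y = x
            · exact Or.inl hyx
            · refine Or.inr ⟨?_, by rw [← hcy y hyx]; exact h2⟩
              rcases (hmem y).mp h1 with h | h
              · exact absurd h hyx
              · exact h
      · rw [if_neg hodd]
        refine ⟨ihp, fun y => ?_⟩
        rw [ihm y]
        constructor
        · rintro ⟨h1, h2⟩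
          have hyx : y ≠ x := fun h => absurd (hr_lt y h1) (by simp [h])
          exact ⟨(hmem y).mpr (Or.inr h1), by rw [hcy y hyx]; exact h2⟩
        · rintro ⟨h1, h2⟩
          by_cases hyx : y = x
          · subst hyx; rw [hcx] at h2; exact absurd h2 hodd
          · refine ⟨?_, by rw [← hcy y hyx]; exact h2⟩
            rcases (hmem y).mp h1 with h | h
            · exact absurd h hyx
            · exact h

-- ===== VERDICT (by name: the statement is the Claim_ definition above) =====
theorem condense_spec : Claim_equal_condense := by
  intro f_min _
  unfold Spec_condense condense_alt
  rw [condense_eq_sorted_filter]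
  set s := PySem.List.sorted f_min (fun x : Int => x) true with hsdef
  have hs_perm : s.Perm f_min := PySem.List.sorted_perm f_min _ true
  have hs_desc : s.Pairwise (fun a b => b ≤ a) := PySem.List.sorted_pairwise_rev f_min _
  obtain ⟨hBp, hBm⟩ := condenseRLE_spec s.length s (le_refl _) hs_desc
  set F := (PySem.Set.ofList f_min).filter (fun x => !(List.count x f_min % 2 == 0)) with hF
  set zs := PySem.List.sorted F (fun x : Int => x) true with hzs
  have hF_nodup : F.Nodup := (PySem.Set.nodup_ofList f_min).filter _
  have hzs_nodup : zs.Nodup := ((PySem.List.sorted_perm F _ true).symm).nodup hF_nodup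
  have hzs_desc : zs.Pairwise (fun a b : Int => b < a) := by
    have h1 : zs.Pairwise (fun a b : Int => b ≤ a) := PySem.List.sorted_pairwise_rev F _
    have h2 : zs.Pairwise (fun a b : Int => a ≠ b) := hzs_nodup
    exact (h1.and h2).imp (by intro a b ⟨hle, hne⟩; omega)
  apply eq_of_desc_of_mem zs (condenseRLE s) hzs_desc hBp
  intro x
  rw [PySem.List.mem_sorted, hBm x]
  rw [hF, List.mem_filter, PySem.Set.mem_ofList]
  rw [hs_perm.mem_iff, hs_perm.count_eq]
  constructor
  · rintro ⟨h1, h2⟩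
    simp only [Bool.not_eq_true', beq_eq_false_iff_ne] at h2
    exact ⟨h1, by omega⟩
  · rintro ⟨h1, h2⟩
    refine ⟨h1, ?_⟩
    simp only [Bool.not_eq_true', beq_eq_false_iff_ne]
    omega
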